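-- pv_equiv track=rewrite | github.com/scottmreed/professor-wiggum | mechanistic_agent/api/app.py | _node_status_history
-- ===== SOURCE A (Python) =====
-- from typing import Any, Dict, List, Optional
--
-- def _node_status_history(snapshot: Dict[str, Any]) -> Dict[str, Dict[str, int]]:
--     history: Dict[str, Dict[str, int]] = {}
--     events = sorted(snapshot.get("events") or [], key=lambda item: int(item.get("seq") or 0))
--     for event in events:
--         step_name = str(event.get("step_name") or "")
--         event_type = str(event.get("event_type") or "")
--         if not step_name:
--             continue
--         row = history.setdefault(step_name, {"started": 0, "completed": 0, "failed": 0})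
--         if event_type == "step_started":
--             row["started"] += 1
--         elif event_type == "step_completed":
--             row["completed"] += 1
--         elif event_type == "step_failed":
--             row["failed"] += 1
--     return history
-- ===== SOURCE B (Python) =====
-- def _node_status_history(snapshot):
--     # First pass: group the event types of each non-empty step name, in sorted-event order.
--     index = {}
--     for event in sorted(snapshot.get("events") or [], key=lambda item: int(item.get("seq") or 0)):
--         name = str(event.get("step_name") or "")
--         if name:
--             index.setdefault(name, []).append(str(event.get("event_type") or ""))
--     # Second pass: tabulate each node's row from its list of event types.
--     return {
--         name: {
--             "started": types.count("step_started"),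
--             "completed": types.count("step_completed"),
--             "failed": types.count("step_failed"),
--         }
--         for name, types in index.items()
--     }
-- ===== Notes on version B (the rewrite author's own statement) =====
-- stated objective: alternative
-- what changed: A tallies counts in a single accumulating scan that increments per-node counter dicts in place; B first groups the sorted events into an index mapping each non-empty step name to the list of its event types, then tabulates each node's started/completed/failed row from that list in a second pass.
import Mathlib
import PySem

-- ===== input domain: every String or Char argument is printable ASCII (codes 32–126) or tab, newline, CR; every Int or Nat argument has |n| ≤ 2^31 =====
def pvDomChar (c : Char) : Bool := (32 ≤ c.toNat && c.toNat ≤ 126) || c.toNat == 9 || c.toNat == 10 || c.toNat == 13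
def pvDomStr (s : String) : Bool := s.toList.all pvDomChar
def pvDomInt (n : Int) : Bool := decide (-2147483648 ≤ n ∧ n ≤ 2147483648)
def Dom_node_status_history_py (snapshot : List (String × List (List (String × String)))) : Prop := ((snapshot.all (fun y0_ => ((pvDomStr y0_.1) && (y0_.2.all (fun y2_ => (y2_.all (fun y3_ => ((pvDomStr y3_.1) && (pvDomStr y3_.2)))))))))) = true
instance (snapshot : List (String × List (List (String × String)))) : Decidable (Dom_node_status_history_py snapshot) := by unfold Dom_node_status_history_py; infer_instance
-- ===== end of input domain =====

-- B replaces A's single accumulating scan by a grouping pass (step name -> its event types)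
-- followed by a per-node tabulation pass; objective: alternative decomposition, same cost.

-- ===== PORT A =====
-- sort key shared by both sources: int(item.get("seq") or 0); total under Pre_ (the parse succeeds)
def nshSeqKey (event : List (String × String)) : Int :=
  let s := ((PySem.Dict.mk event).get? "seq").getD ""
  if s = "" then 0 else (PySem.Int.ofStr? s).getD 0

-- the body of A's for-loop
def nshStepA (h : PySem.Dict String (PySem.Dict String Int)) (event : List (String × String)) :
    PySem.Dict String (PySem.Dict String Int) :=
  let step_name := ((PySem.Dict.mk event).get? "step_name").getD ""
  let event_type := ((PySem.Dict.mk event).get? "event_type").getD ""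
  if step_name = "" then h
  else
    let h1 := h.setdefault step_name (PySem.Dict.mk [("started", 0), ("completed", 0), ("failed", 0)])
    if event_type = "step_started" then
      h1.modify step_name (PySem.Dict.mk []) (fun row => row.modify "started" 0 (· + 1))
    else if event_type = "step_completed" then
      h1.modify step_name (PySem.Dict.mk []) (fun row => row.modify "completed" 0 (· + 1))
    else if event_type = "step_failed" then
      h1.modify step_name (PySem.Dict.mk []) (fun row => row.modify "failed" 0 (· + 1))
    else h1

def node_status_history_py (snapshot : List (String × List (List (String × String)))) : List (String × List (String × Int)) :=
  let events := ((PySem.Dict.mk snapshot).get? "events").getD []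
  let history := (PySem.List.sorted events nshSeqKey false).foldl nshStepA (PySem.Dict.mk [])
  history.items.map (fun p => (p.1, p.2.items))

-- ===== PORT B =====
-- the body of B's grouping loop: index.setdefault(name, []).append(event_type)
def nshStepB (d : PySem.Dict String (List String)) (event : List (String × String)) :
    PySem.Dict String (List String) :=
  let name := ((PySem.Dict.mk event).get? "step_name").getD ""
  if name = "" then d
  else d.modify name [] (fun ts => ts ++ [((PySem.Dict.mk event).get? "event_type").getD ""])

def node_status_history_py_alt (snapshot : List (String × List (List (String × String)))) : List (String × List (String × Int)) :=
  let index := (PySem.List.sorted (((PySem.Dict.mk snapshot).get? "events").getD []) nshSeqKey false).foldl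
      nshStepB (PySem.Dict.mk [])
  index.items.map (fun p =>
    (p.1, [("started", (p.2.count "step_started" : Int)),
           ("completed", (p.2.count "step_completed" : Int)),
           ("failed", (p.2.count "step_failed" : Int))]))

-- ===== PRECONDITION & SPEC =====
-- Pre_: Python A raises ValueError when some event's "seq" value is present, non-empty and not int-parseable.
def Pre_node_status_history_py (snapshot : List (String × List (List (String × String)))) : Prop :=
  ∀ event ∈ ((PySem.Dict.mk snapshot).get? "events").getD [],
    ((PySem.Dict.mk event).get? "seq").getD "" = "" ∨
    (PySem.Int.ofStr? (((PySem.Dict.mk event).get? "seq").getD "")).isSome = true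
instance (snapshot : List (String × List (List (String × String)))) : Decidable (Pre_node_status_history_py snapshot) := by unfold Pre_node_status_history_py; infer_instance

def pvWitness_node_status_history_py : (List (String × List (List (String × String)))) :=
  [("events", [[("step_name", "a"), ("event_type", "step_started"), ("seq", "2")],
               [("step_name", "a"), ("event_type", "step_failed"), ("seq", "1")],
               [("step_name", "b"), ("event_type", "other")]])]

def Spec_node_status_history_py (snapshot : List (String × List (List (String × String)))) (out : List (String × List (String × Int))) : Prop := out = node_status_history_py_alt snapshot
instance (snapshot : List (String × List (List (String × String)))) (out : List (String × List (String × Int))) : Decidable (Spec_node_status_history_py snapshot out) := by unfold Spec_node_status_history_py; infer_instance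

-- ===== CLAIM (what is proved, stated in full; the proofs are below) =====
def Claim_equal_node_status_history_py : Prop := ∀ (snapshot : List (String × List (List (String × String)))), Dom_node_status_history_py snapshot → Pre_node_status_history_py snapshot → Spec_node_status_history_py snapshot (node_status_history_py snapshot)

-- ===== LEMMAS AND PROOFS =====
def nshRowD (ts : List String) : PySem.Dict String Int :=
  PySem.Dict.mk [("started", (ts.count "step_started" : Int)),
                 ("completed", (ts.count "step_completed" : Int)),
                 ("failed", (ts.count "step_failed" : Int))]
def nshLift (d : PySem.Dict String (List String)) : PySem.Dict String (PySem.Dict String Int) :=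
  PySem.Dict.mk (d.items.map (fun p => (p.1, nshRowD p.2)))

theorem nshContains_lift (d : PySem.Dict String (List String)) (k : String) :
    (nshLift d).contains k = d.contains k := by
  simp [nshLift, PySem.Dict.contains, List.any_map, Function.comp_def]

theorem nshGet?_lift (d : PySem.Dict String (List String)) (k : String) :
    (nshLift d).get? k = (d.get? k).map nshRowD := by
  simp [nshLift, PySem.Dict.get?, List.find?_map, Function.comp_def]

theorem nshInsert_lift (d : PySem.Dict String (List String)) (k : String) (v : List String) :
    (nshLift d).insert k (nshRowD v) = nshLift (d.insert k v) := by
  unfold PySem.Dict.insert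
  rw [nshContains_lift]
  by_cases h : d.contains k = true
  · simp only [h, if_true, nshLift, List.map_map]
    congr 1
    apply List.map_congr_left
    intro p _
    by_cases hp : p.1 == k <;> simp [hp, Function.comp]
  · simp [h, nshLift]

theorem nshSetdefault_lift (d : PySem.Dict String (List String)) (k : String) (v : List String) :
    (nshLift d).setdefault k (nshRowD v) = nshLift (d.setdefault k v) := by
  unfold PySem.Dict.setdefault
  rw [nshContains_lift]
  by_cases h : d.contains k = true <;> simp [h, nshLift]



theorem nshSetdefault_insert (d : PySem.Dict String (List String)) (k : String)
    (v x : List String) : (d.setdefault k v).insert k x = d.insert k x := by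
  by_cases h : d.contains k = true
  · rw [PySem.Dict.setdefault_of_contains d v h]
  · rw [PySem.Dict.setdefault_of_not_contains d v (by simpa using h),
        PySem.Dict.insert_insert_self]

theorem nshLift_insert_row_eq (d : PySem.Dict String (List String)) (k : String)
    (et : String) (hnd : d.keys.Nodup)
    (hrow : nshRowD (((d.get? k).getD []) ++ [et]) = nshRowD ((d.get? k).getD [])) :
    nshLift (d.insert k (((d.get? k).getD []) ++ [et])) = nshLift (d.setdefault k []) := by
  by_cases h : d.contains k = true
  · rw [PySem.Dict.setdefault_of_contains d [] h]
    obtain ⟨ts, hts⟩ : ∃ ts, d.get? k = some ts := by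
      have hc := PySem.Dict.contains_eq_isSome_get? d k
      rw [h] at hc
      exact Option.isSome_iff_exists.mp hc.symm
    rw [hts] at hrow ⊢
    simp only [Option.getD_some] at hrow ⊢
    unfold PySem.Dict.insert
    rw [if_pos h]
    simp only [nshLift, List.map_map]
    congr 1
    apply List.map_congr_left
    intro p hp
    simp only [Function.comp_apply]
    by_cases hk : (p.1 == k) = true
    · have hpk : p.1 = k := by simpa using hk
      have hget : d.get? p.1 = some p.2 := PySem.Dict.get?_of_mem_items d (by simpa using hp) hnd
      rw [hpk, hts] at hget
      have hpts : ts = p.2 := by injection hget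
      rw [if_pos hk]
      rw [← hpts] at *
      simp [hrow, hpk]
    · rw [if_neg hk]
  · have h0 : d.contains k = false := by simpa using h
    have h' : d.get? k = none := by
      have hc := PySem.Dict.contains_eq_isSome_get? d k
      rw [h0] at hc
      exact Option.not_isSome_iff_eq_none.mp (by rw [← hc]; simp)
    rw [PySem.Dict.setdefault_of_not_contains d [] h0]
    rw [h'] at hrow ⊢
    simp only [Option.getD_none, List.nil_append] at hrow ⊢
    rw [← nshInsert_lift, ← nshInsert_lift, hrow]

theorem nshRow_started (ts : List String) :
    (nshRowD ts).modify "started" 0 (· + 1) = nshRowD (ts ++ ["step_started"]) := by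
  simp [nshRowD, PySem.Dict.modify, PySem.Dict.insert, PySem.Dict.contains, PySem.Dict.getD,
        PySem.Dict.get?, List.count_append]

theorem nshRow_completed (ts : List String) :
    (nshRowD ts).modify "completed" 0 (· + 1) = nshRowD (ts ++ ["step_completed"]) := by
  simp [nshRowD, PySem.Dict.modify, PySem.Dict.insert, PySem.Dict.contains, PySem.Dict.getD,
        PySem.Dict.get?, List.count_append]

theorem nshRow_failed (ts : List String) :
    (nshRowD ts).modify "failed" 0 (· + 1) = nshRowD (ts ++ ["step_failed"]) := by
  simp [nshRowD, PySem.Dict.modify, PySem.Dict.insert, PySem.Dict.contains, PySem.Dict.getD,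
        PySem.Dict.get?, List.count_append]

theorem nshRow_other (ts : List String) (et : String) (h1 : et ≠ "step_started")
    (h2 : et ≠ "step_completed") (h3 : et ≠ "step_failed") :
    nshRowD (ts ++ [et]) = nshRowD ts := by
  simp [nshRowD, List.count_append, h1, h2, h3]

theorem nshRow_empty :
    nshRowD [] = PySem.Dict.mk [("started", 0), ("completed", 0), ("failed", 0)] := rfl

theorem nshGetD_lift_setdefault (d : PySem.Dict String (List String)) (k : String) :
    ((nshLift (d.setdefault k [])).getD k (PySem.Dict.mk []))
      = nshRowD ((d.get? k).getD []) := by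
  rw [PySem.Dict.getD_eq_get?_getD, nshGet?_lift, PySem.Dict.get?_setdefault_self]
  rfl

theorem nshStep_comm (d : PySem.Dict String (List String)) (event : List (String × String))
    (hnd : d.keys.Nodup) :
    nshStepA (nshLift d) event = nshLift (nshStepB d event) := by
  simp only [nshStepA, nshStepB]
  by_cases hn : ((PySem.Dict.mk event).get? "step_name").getD "" = ""
  · rw [if_pos hn, if_pos hn]
  · rw [if_neg hn, if_neg hn]
    rw [← nshRow_empty, nshSetdefault_lift]
    set n := ((PySem.Dict.mk event).get? "step_name").getD "" with hn_def
    set et := ((PySem.Dict.mk event).get? "event_type").getD "" with het_def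
    set ts0 := (d.get? n).getD [] with hts0
    have hB : d.modify n [] (fun ts => ts ++ [et]) = d.insert n (ts0 ++ [et]) := by
      rw [PySem.Dict.modify, PySem.Dict.getD_eq_get?_getD]
    rw [hB]
    by_cases h1 : et = "step_started"
    · rw [if_pos h1, PySem.Dict.modify, nshGetD_lift_setdefault, nshRow_started, ← hts0, ← h1,
          nshInsert_lift, nshSetdefault_insert]
    · rw [if_neg h1]
      by_cases h2 : et = "step_completed"
      · rw [if_pos h2, PySem.Dict.modify, nshGetD_lift_setdefault, nshRow_completed, ← hts0, ← h2,
            nshInsert_lift, nshSetdefault_insert]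
      · rw [if_neg h2]
        by_cases h3 : et = "step_failed"
        · rw [if_pos h3, PySem.Dict.modify, nshGetD_lift_setdefault, nshRow_failed, ← hts0, ← h3,
              nshInsert_lift, nshSetdefault_insert]
        · rw [if_neg h3]
          rw [nshLift_insert_row_eq d n et hnd (nshRow_other _ _ h1 h2 h3)]

theorem nshStepB_nodup (d : PySem.Dict String (List String)) (event : List (String × String))
    (h : d.keys.Nodup) : (nshStepB d event).keys.Nodup := by
  simp only [nshStepB, PySem.Dict.modify]
  by_cases hn : ((PySem.Dict.mk event).get? "step_name").getD "" = ""
  · rw [if_pos hn]; exact h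
  · rw [if_neg hn]; exact PySem.Dict.nodup_keys_insert _ _ _ h

theorem nshFold_comm (events : List (List (String × String))) :
    ∀ d : PySem.Dict String (List String), d.keys.Nodup →
      events.foldl nshStepA (nshLift d) = nshLift (events.foldl nshStepB d) := by
  induction events with
  | nil => intro d _; rfl
  | cons e es ih =>
    intro d hd
    rw [List.foldl_cons, List.foldl_cons, nshStep_comm d e hd]
    exact ih _ (nshStepB_nodup d e hd)

-- ===== VERDICT (by name: the statement is the Claim_ definition above) =====
theorem node_status_history_py_spec : Claim_equal_node_status_history_py := by
  intro snapshot _ _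
  unfold Spec_node_status_history_py node_status_history_py node_status_history_py_alt
  have hnd : (PySem.Dict.mk ([] : List (String × List String))).keys.Nodup := List.nodup_nil
  have h := nshFold_comm
    (PySem.List.sorted (((PySem.Dict.mk snapshot).get? "events").getD []) nshSeqKey false)
    (PySem.Dict.mk []) hnd
  have h0 : nshLift (PySem.Dict.mk []) = PySem.Dict.mk [] := rfl
  rw [h0] at h
  simp only [h, nshLift, nshRowD, List.map_map]
  rfl
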